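-- pv_equiv track=rewrite | github.com/ArthurrMrv/advent-of-code | 2023/day8.py | part1
-- ===== SOURCE A (Python) =====
-- def part1(path, map_tunel):
--     current = "AAA"
--     it = 0
--     while it < 1_000_000 and current != "ZZZ":
--         if current in map_tunel:
--             if path[it%len(path)] == "L":
--                 current = map_tunel[current]["L"]
--             elif path[it%len(path)] == "R":
--                 current = map_tunel[current]["R"]
--         it += 1
--     return it
-- ===== SOURCE B (Python) =====
-- def part1(path, map_tunel):
--     # Same walk as the original, but with (node, instruction-phase) cycle
--     # detection: once a state repeats (or the node leaves the map), the walk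
--     # can never reach "ZZZ", so the capped loop would spin to 1_000_000.
--     L = len(path)
--     current = "AAA"
--     it = 0
--     seen = set()
--     while it < 1_000_000:
--         if current == "ZZZ":
--             return it
--         if current not in map_tunel:
--             return 1_000_000
--         state = (current, it % L)
--         if state in seen:
--             return 1_000_000
--         seen.add(state)
--         ch = path[it % L]
--         if ch == "L":
--             current = map_tunel[current]["L"]
--         elif ch == "R":
--             current = map_tunel[current]["R"]
--         it += 1
--     return it
-- ===== Notes on version B (the rewrite author's own statement) =====
-- stated objective: faster
-- what changed: B replaces A's blind spin to the 1,000,000-iteration cap with (node, instruction-phase) cycle detection via a visited-state set, returning the cap immediately once a state repeats or the node has no map entry, since the walk is then provably non-terminating.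
-- outside the precondition, e.g. on part1('L', {'AAA': {'L': 'ZZZ'}, 'BBB': {}}): A returns 1, B returns 1
import Mathlib
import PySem

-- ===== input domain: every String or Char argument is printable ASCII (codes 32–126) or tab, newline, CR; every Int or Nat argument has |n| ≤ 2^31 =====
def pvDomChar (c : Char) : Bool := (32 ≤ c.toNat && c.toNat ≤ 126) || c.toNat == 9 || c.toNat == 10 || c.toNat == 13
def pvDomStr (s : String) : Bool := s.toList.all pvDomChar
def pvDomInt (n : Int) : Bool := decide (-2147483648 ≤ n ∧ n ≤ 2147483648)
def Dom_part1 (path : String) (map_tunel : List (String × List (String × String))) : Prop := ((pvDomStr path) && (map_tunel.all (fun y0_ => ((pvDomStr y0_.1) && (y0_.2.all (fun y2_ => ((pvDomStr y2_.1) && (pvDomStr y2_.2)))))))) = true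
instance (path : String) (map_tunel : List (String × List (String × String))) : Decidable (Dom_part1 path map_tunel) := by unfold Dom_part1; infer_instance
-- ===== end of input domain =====

-- B adds (node, instruction-phase) cycle detection to A's capped walk and returns the
-- 1_000_000 cap as soon as a state repeats or the node leaves the map, instead of
-- spinning the loop to the cap; equal to A on all inputs admitted by Pre_part1.

-- ===== PORT A =====
-- One body of A's while-loop: `some next` = the new `current`; `none` = the Python
-- raises there (ZeroDivisionError on `it % len(path)` with an empty path, or
-- KeyError on a missing "L"/"R" key) — those inputs are excluded by Pre_part1.
def part1Step? (path : String) (map_tunel : List (String × List (String × String))) (current : String) (it : Nat) : Option String :=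
  match map_tunel.find? (fun q => q.1 == current) with
  | none => some current
  | some e =>
    match PySem.Int.mod? (it : Int) (PySem.Str.len path) with
    | none => none
    | some i =>
      match PySem.Str.pyGet? path i with
      | none => none
      | some ch =>
        if ch = 'L' then (e.2.find? (fun q => q.1 == "L")).map (·.2)
        else if ch = 'R' then (e.2.find? (fun q => q.1 == "R")).map (·.2)
        else some current

def part1Loop (path : String) (map_tunel : List (String × List (String × String))) (current : String) (it : Nat) : Int :=
  if _h : it < 1000000 ∧ current ≠ "ZZZ" then
    match part1Step? path map_tunel current it with
    | some c' => part1Loop path map_tunel c' (it + 1)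
    | none => (it : Int)          -- the Python raises here (outside Pre_part1)
  else (it : Int)
termination_by 1000000 - it
decreasing_by omega

def part1 (path : String) (map_tunel : List (String × List (String × String))) : Int :=
  part1Loop path map_tunel "AAA" 0

-- ===== PORT B =====
def part1AltLoop (path : String) (map_tunel : List (String × List (String × String))) (seen : PySem.Set (String × Int)) (current : String) (it : Nat) : Int :=
  if _h : it < 1000000 then
    if current = "ZZZ" then (it : Int)
    else
      match map_tunel.find? (fun q => q.1 == current) with
      | none => (1000000 : Int)
      | some e =>
        match PySem.Int.mod? (it : Int) (PySem.Str.len path) with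
        | none => (it : Int)      -- the Python raises here (outside Pre_part1)
        | some p =>
          if PySem.Set.contains seen (current, p) then (1000000 : Int)
          else
            match (if (PySem.Str.pyGet? path p).getD ' ' = 'L' then (e.2.find? (fun q => q.1 == "L")).map (·.2)
                   else if (PySem.Str.pyGet? path p).getD ' ' = 'R' then (e.2.find? (fun q => q.1 == "R")).map (·.2)
                   else some current) with
            | none => (it : Int)  -- the Python raises here (outside Pre_part1)
            | some c' => part1AltLoop path map_tunel (PySem.Set.add seen (current, p)) c' (it + 1)
  else (it : Int)
termination_by 1000000 - it
decreasing_by omega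

def part1_alt (path : String) (map_tunel : List (String × List (String × String))) : Int :=
  part1AltLoop path map_tunel PySem.Set.empty "AAA" 0

-- ===== PRECONDITION & SPEC =====
-- Pre_part1 excludes the inputs on which A can raise: ZeroDivisionError ('it % len(path)'
-- with an empty path once the walk is inside the map) and KeyError (a map entry missing an
-- "L"/"R" key the instruction string demands). The key condition is required of EVERY map
-- entry, an over-approximation of the reachable entries, so a few inputs on which A still
-- returns (a defective entry the walk never visits) are excluded too.
def Pre_part1 (path : String) (map_tunel : List (String × List (String × String))) : Prop :=
  (∀ e ∈ map_tunel, e.1 ≠ "AAA") ∨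
  (path.toList ≠ [] ∧ ∀ e ∈ map_tunel,
     (('L' ∈ path.toList) → ∃ q ∈ e.2, q.1 = "L") ∧
     (('R' ∈ path.toList) → ∃ q ∈ e.2, q.1 = "R"))
instance (path : String) (map_tunel : List (String × List (String × String))) : Decidable (Pre_part1 path map_tunel) := by unfold Pre_part1; infer_instance

def pvWitness_part1 : String × (List (String × List (String × String))) :=
  ("LR", [("AAA", [("L", "BBB"), ("R", "AAA")]), ("BBB", [("L", "ZZZ"), ("R", "ZZZ")])])

def Spec_part1 (path : String) (map_tunel : List (String × List (String × String))) (out : Int) : Prop := out = part1_alt path map_tunel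
instance (path : String) (map_tunel : List (String × List (String × String))) (out : Int) : Decidable (Spec_part1 path map_tunel out) := by unfold Spec_part1; infer_instance

-- ===== CLAIM (what is proved, stated in full; the proofs are below) =====
def Claim_equal_part1 : Prop := ∀ (path : String) (map_tunel : List (String × List (String × String))), Dom_part1 path map_tunel → Pre_part1 path map_tunel → Spec_part1 path map_tunel (part1 path map_tunel)

-- ===== LEMMAS AND PROOFS =====

-- Total step function: what one loop body does to `current` when nothing raises.
def nxtF (path : String) (map_tunel : List (String × List (String × String))) (c : String) (p : Nat) : String :=
  match map_tunel.find? (fun q => q.1 == c) with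
  | none => c
  | some e =>
    match path.toList[p]? with
    | none => c
    | some ch =>
      if ch = 'L' then ((e.2.find? (fun q => q.1 == "L")).map (·.2)).getD c
      else if ch = 'R' then ((e.2.find? (fun q => q.1 == "R")).map (·.2)).getD c
      else c

-- The walk's trajectory: the node after n steps.
def trajF (path : String) (map_tunel : List (String × List (String × String))) : Nat → String
  | 0 => "AAA"
  | n + 1 => nxtF path map_tunel (trajF path map_tunel n) (n % path.toList.length)

theorem lemMod (path : String) (hL : path.toList ≠ []) (it : Nat) :
    PySem.Int.mod? (it : Int) (PySem.Str.len path) = some (((it % path.toList.length : Nat)) : Int) := by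
  have h0 : path ≠ "" := by intro h; rw [h] at hL; simp at hL
  simp [PySem.Int.mod?, PySem.Str.len_eq, h0]
  rw [Int.fmod_eq_emod]; simp

theorem lemFind (d : List (String × String)) (k : String) (h : ∃ q ∈ d, q.1 = k) :
    ∃ v, d.find? (fun q => q.1 == k) = some v ∧ ((d.find? (fun q => q.1 == k)).map (·.2)) = some v.2 := by
  have : (d.find? (fun q => q.1 == k)).isSome := by
    rw [List.find?_isSome]; obtain ⟨q, hq, he⟩ := h; exact ⟨q, hq, by simp [he]⟩
  obtain ⟨v, hv⟩ := Option.isSome_iff_exists.mp this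
  exact ⟨v, hv, by simp [hv]⟩

-- Under the key-availability half of Pre_, A's loop body never raises and computes nxtF.
theorem lemStep (path : String) (map_tunel : List (String × List (String × String)))
    (hL : path.toList ≠ [])
    (hK : ∀ e ∈ map_tunel, (('L' ∈ path.toList) → ∃ q ∈ e.2, q.1 = "L") ∧ (('R' ∈ path.toList) → ∃ q ∈ e.2, q.1 = "R"))
    (c : String) (it : Nat) :
    part1Step? path map_tunel c it = some (nxtF path map_tunel c (it % path.toList.length)) := by
  unfold part1Step? nxtF
  cases hfind : map_tunel.find? (fun q => q.1 == c) with
  | none => rfl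
  | some e =>
    have he : e ∈ map_tunel := List.mem_of_find?_eq_some hfind
    have hlt : it % path.toList.length < path.toList.length :=
      Nat.mod_lt _ (List.length_pos_iff.mpr hL)
    have hget : PySem.Str.pyGet? path (((it % path.toList.length : Nat)) : Int)
        = some (path.toList[it % path.toList.length]) := by
      rw [PySem.Str.pyGet?_natCast, List.getElem?_eq_getElem hlt]
    simp only [lemMod path hL it, hget, List.getElem?_eq_getElem hlt]
    set ch := path.toList[it % path.toList.length] with hch
    have hmem : ch ∈ path.toList := List.getElem_mem _
    by_cases hchL : ch = 'L'
    · obtain ⟨v, hv, hv2⟩ := lemFind e.2 "L" ((hK e he).1 (hchL ▸ hmem))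
      simp [hchL, hv]
    · by_cases hchR : ch = 'R'
      · obtain ⟨v, hv, hv2⟩ := lemFind e.2 "R" ((hK e he).2 (hchR ▸ hmem))
        simp [hchR, hv]
      · simp [hchL, hchR]

theorem lemPeriod (path : String) (mt : List (String × List (String × String))) (k d : Nat)
    (hd : path.toList.length ∣ d) (hc : trajF path mt (k + d) = trajF path mt k) :
    ∀ j, trajF path mt (k + j + d) = trajF path mt (k + j) := by
  intro j
  induction j with
  | zero => simpa using hc
  | succ j ih =>
    obtain ⟨t, ht⟩ := hd
    have harith : k + (j+1) + d = (k + j + d) + 1 := by omega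
    rw [harith]
    show nxtF path mt (trajF path mt (k + j + d)) ((k + j + d) % path.toList.length)
       = trajF path mt (k + j + 1)
    have hmod : (k + j + d) % path.toList.length = (k + j) % path.toList.length := by
      rw [ht]; exact Nat.add_mul_mod_self_left (k + j) path.toList.length t
    rw [ih, hmod]; rfl

-- Once a (node, phase) state repeats with no "ZZZ" seen, "ZZZ" is never reached.
theorem lemFuture (path : String) (mt : List (String × List (String × String))) (k it : Nat)
    (hk : k < it) (hkL : k % path.toList.length = it % path.toList.length)
    (hrep : trajF path mt k = trajF path mt it)
    (hZ : ∀ j, j ≤ it → trajF path mt j ≠ "ZZZ") :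
    ∀ m, trajF path mt m ≠ "ZZZ" := by
  have hd : path.toList.length ∣ it - k :=
    (Nat.modEq_iff_dvd' (Nat.le_of_lt hk)).mp hkL
  have hper := lemPeriod path mt k (it - k) hd (by rw [Nat.add_sub_cancel' (Nat.le_of_lt hk)]; exact hrep.symm)
  intro m
  induction m using Nat.strong_induction_on with
  | _ m ih =>
    by_cases hm : m ≤ it
    · exact hZ m hm
    · have h1 : m - (it - k) < m := by omega
      have h2 : trajF path mt m = trajF path mt (m - (it - k)) := by
        have := hper (m - (it - k) - k)
        have e1 : k + (m - (it - k) - k) = m - (it - k) := by omega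
        rw [e1] at this
        have e3 : m - (it - k) + (it - k) = m := by omega
        rw [e3] at this; exact this
      rw [h2]; exact ih _ h1

-- A node outside the map never moves again.
theorem lemConst (path : String) (mt : List (String × List (String × String))) (it : Nat)
    (hfind : mt.find? (fun q => q.1 == trajF path mt it) = none) :
    ∀ j, trajF path mt (it + j) = trajF path mt it := by
  intro j
  induction j with
  | zero => rfl
  | succ j ih =>
    show nxtF path mt (trajF path mt (it + j)) ((it + j) % path.toList.length) = trajF path mt it
    rw [ih]
    unfold nxtF
    rw [hfind]

-- If the trajectory never reaches "ZZZ", A's loop spins to the cap.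
theorem lemA_noZ (path : String) (mt : List (String × List (String × String)))
    (hL : path.toList ≠ [])
    (hK : ∀ e ∈ mt, (('L' ∈ path.toList) → ∃ q ∈ e.2, q.1 = "L") ∧ (('R' ∈ path.toList) → ∃ q ∈ e.2, q.1 = "R")) :
    ∀ fuel it, it + fuel = 1000000 → (∀ m, it ≤ m → trajF path mt m ≠ "ZZZ") →
    part1Loop path mt (trajF path mt it) it = 1000000 := by
  intro fuel
  induction fuel with
  | zero =>
    intro it h _
    rw [part1Loop, dif_neg (by omega)]
    omega
  | succ f ih =>
    intro it h hZ
    rw [part1Loop, dif_pos ⟨by omega, hZ it le_rfl⟩]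
    simp only [lemStep path mt hL hK _ it]
    show part1Loop path mt (trajF path mt (it + 1)) (it + 1) = 1000000
    exact ih (it + 1) (by omega) (fun m hm => hZ m (by omega))

-- The main simulation: B's loop with the visited-state set returns exactly A's loop value.
theorem lemMain (path : String) (mt : List (String × List (String × String)))
    (hL : path.toList ≠ [])
    (hK : ∀ e ∈ mt, (('L' ∈ path.toList) → ∃ q ∈ e.2, q.1 = "L") ∧ (('R' ∈ path.toList) → ∃ q ∈ e.2, q.1 = "R")) :
    ∀ fuel it (seen : PySem.Set (String × Int)), it + fuel = 1000000 →
    (∀ s : String × Int, s ∈ seen ↔ ∃ k, k < it ∧ s = (trajF path mt k, ((k % path.toList.length : Nat) : Int))) →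
    (∀ k, k < it → trajF path mt k ≠ "ZZZ") →
    part1AltLoop path mt seen (trajF path mt it) it = part1Loop path mt (trajF path mt it) it := by
  intro fuel
  induction fuel with
  | zero =>
    intro it seen h _ _
    rw [part1AltLoop, dif_neg (by omega), part1Loop, dif_neg (by rintro ⟨h1, _⟩; omega)]
  | succ f ih =>
    intro it seen h hseen hZ
    have h1 : it < 1000000 := by omega
    rw [part1AltLoop, dif_pos h1]
    by_cases hz : trajF path mt it = "ZZZ"
    · rw [if_pos hz, part1Loop, dif_neg (by rintro ⟨_, hne⟩; exact hne hz)]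
    · rw [if_neg hz]
      have hlt : it % path.toList.length < path.toList.length :=
        Nat.mod_lt _ (List.length_pos_iff.mpr hL)
      cases hfind : mt.find? (fun q => q.1 == trajF path mt it) with
      | none =>
        simp only []
        symm
        apply lemA_noZ path mt hL hK (f + 1) it (by omega)
        intro m hm
        have := lemConst path mt it hfind (m - it)
        rw [Nat.add_sub_cancel' hm] at this
        rw [this]; exact hz
      | some e =>
        have he : e ∈ mt := List.mem_of_find?_eq_some hfind
        simp only [lemMod path hL it]
        by_cases hmem : ((trajF path mt it, ((it % path.toList.length : Nat) : Int)) : String × Int) ∈ seen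
        · rw [if_pos ((PySem.Set.contains_iff _ _).mpr hmem)]
          obtain ⟨k, hk, hkeq⟩ := (hseen _).mp hmem
          have hkc : trajF path mt k = trajF path mt it := (congrArg Prod.fst hkeq).symm
          have hkL : k % path.toList.length = it % path.toList.length :=
            (Nat.cast_inj.mp (congrArg Prod.snd hkeq)).symm
          symm
          apply lemA_noZ path mt hL hK (f + 1) it (by omega)
          intro m _
          exact lemFuture path mt k it hk hkL hkc
            (fun j hj => by rcases Nat.lt_or_ge j it with hj' | hj'
                            · exact hZ j hj'
                            · have : j = it := by omega
                              rw [this]; exact hz) m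
        · rw [if_neg (by rw [PySem.Set.contains_iff _ _]; exact hmem)]
          have hget : PySem.Str.pyGet? path (((it % path.toList.length : Nat)) : Int)
              = some (path.toList[it % path.toList.length]) := by
            rw [PySem.Str.pyGet?_natCast, List.getElem?_eq_getElem hlt]
          simp only [hget, Option.getD_some]
          -- the next node is trajF (it+1)
          have hnxt : ∀ c', (if path.toList[it % path.toList.length] = 'L' then (e.2.find? (fun q => q.1 == "L")).map (·.2)
                   else if path.toList[it % path.toList.length] = 'R' then (e.2.find? (fun q => q.1 == "R")).map (·.2)
                   else some (trajF path mt it)) = some c' → c' = trajF path mt (it + 1) := by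
            intro c' hc'
            have hh : trajF path mt (it + 1) = nxtF path mt (trajF path mt it) (it % path.toList.length) := rfl
            rw [hh]
            have h2 : nxtF path mt (trajF path mt it) (it % path.toList.length)
               = (if path.toList[it % path.toList.length] = 'L' then ((e.2.find? (fun q => q.1 == "L")).map (·.2)).getD (trajF path mt it)
                  else if path.toList[it % path.toList.length] = 'R' then ((e.2.find? (fun q => q.1 == "R")).map (·.2)).getD (trajF path mt it)
                  else (trajF path mt it)) := by
              unfold nxtF
              rw [hfind, List.getElem?_eq_getElem hlt]
            rw [h2]
            split_ifs at hc' ⊢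
            · rw [hc']; rfl
            · rw [hc']; rfl
            · exact (Option.some_inj.mp hc').symm
          -- the branch never produces `none` under hK
          set ch := path.toList[it % path.toList.length] with hch
          have hmemc : ch ∈ path.toList := List.getElem_mem _
          have hsome : ∃ c', (if ch = 'L' then (e.2.find? (fun q => q.1 == "L")).map (·.2)
                   else if ch = 'R' then (e.2.find? (fun q => q.1 == "R")).map (·.2)
                   else some (trajF path mt it)) = some c' := by
            by_cases hchL : ch = 'L'
            · obtain ⟨v, hv, hv2⟩ := lemFind e.2 "L" ((hK e he).1 (hchL ▸ hmemc))
              exact ⟨v.2, by simp [hchL, hv]⟩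
            · by_cases hchR : ch = 'R'
              · obtain ⟨v, hv, hv2⟩ := lemFind e.2 "R" ((hK e he).2 (hchR ▸ hmemc))
                exact ⟨v.2, by simp [hchR, hv]⟩
              · exact ⟨trajF path mt it, by simp [hchL, hchR]⟩
          obtain ⟨c', hc'⟩ := hsome
          rw [hc', hnxt c' hc']
          rw [part1Loop, dif_pos ⟨h1, hz⟩]
          simp only [lemStep path mt hL hK _ it]
          show part1AltLoop path mt _ (trajF path mt (it + 1)) (it + 1)
             = part1Loop path mt (trajF path mt (it + 1)) (it + 1)
          apply ih (it + 1) _ (by omega)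
          · intro s
            rw [PySem.Set.mem_add, hseen s]
            constructor
            · rintro (⟨k, hk, rfl⟩ | rfl)
              · exact ⟨k, by omega, rfl⟩
              · exact ⟨it, by omega, rfl⟩
            · rintro ⟨k, hk, rfl⟩
              rcases Nat.lt_or_ge k it with h' | h'
              · exact Or.inl ⟨k, h', rfl⟩
              · have : k = it := by omega
                subst this
                exact Or.inr rfl
          · intro k hk
            rcases Nat.lt_or_ge k it with h' | h'
            · exact hZ k h'
            · have : k = it := by omega
              subst this
              exact hz

-- Case 1 of Pre_: "AAA" is not a key, so A spins to the cap.
theorem lemA1 (path : String) (mt : List (String × List (String × String)))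
    (hfind : mt.find? (fun q => q.1 == "AAA") = none) :
    ∀ fuel it, it + fuel = 1000000 → part1Loop path mt "AAA" it = 1000000 := by
  intro fuel
  induction fuel with
  | zero =>
    intro it h
    rw [part1Loop, dif_neg (by omega)]
    omega
  | succ f ih =>
    intro it h
    rw [part1Loop, dif_pos ⟨by omega, by decide⟩]
    have hstep : part1Step? path mt "AAA" it = some "AAA" := by
      unfold part1Step?
      rw [hfind]
    simp only [hstep]
    exact ih (it + 1) (by omega)

-- ===== VERDICT (by name: the statement is the Claim_ definition above) =====
theorem part1_spec : Claim_equal_part1 := by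
  intro path mt _hdom hpre
  unfold Spec_part1 part1 part1_alt
  rcases hpre with hA | ⟨hL, hK⟩
  · have hfind : mt.find? (fun q => q.1 == "AAA") = none := by
      rw [List.find?_eq_none]
      intro e he
      simpa using hA e he
    rw [lemA1 path mt hfind 1000000 0 rfl]
    rw [part1AltLoop, dif_pos (by norm_num), if_neg (by decide)]
    rw [hfind]
  · have h0 : "AAA" = trajF path mt 0 := rfl
    rw [h0]
    symm
    apply lemMain path mt hL hK 1000000 0 PySem.Set.empty rfl
    · intro s
      constructor
      · intro hs; exact absurd hs (by simp [PySem.Set.empty])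
      · rintro ⟨k, hk, _⟩; omega
    · intro k hk; omega
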